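-- pv_equiv track=rewrite | github.com/agam-lang/benchmarks | suites/03_data_structures/comparisons/ring_buffer.py | ring_buffer_cost
-- ===== SOURCE A (Python) =====
-- def ring_buffer_cost(cap: int, rounds: int) -> int:
--     head, tail, acc = 0, 0, 0
--     for item in range(rounds):
--         slot = (head + item) % cap
--         acc += ((slot * 17) + item) % 257
--         if item % 3 == 0:
--             tail = (tail + 1) % cap
--             acc += tail
--         head = (head + 1) % cap
--     return acc + head + tail
-- ===== SOURCE B (Python) =====
-- def ring_buffer_cost(cap: int, rounds: int) -> int:
--     # Closed-form: the per-round cost term is periodic in the round index with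
--     # period lcm(cap, 257); sum one period once, multiply by the number of full
--     # periods, and add the partial period.  The tail pointer walks 1..cap-1,0
--     # cyclically, so its contributions are triangular numbers per cycle.
--     if rounds <= 0:
--         return 0
--     L = cap if cap % 257 == 0 else cap * 257
--     q, r = divmod(rounds, L)
--     period = [((2 * i % cap) * 17 + i) % 257 for i in range(min(L, rounds))]
--     main = q * sum(period) + sum(period[:r])
--     m = (rounds + 2) // 3                      # number of tail increments
--     q2, r2 = divmod(m, cap)
--     tails = q2 * (cap * (cap - 1) // 2) + r2 * (r2 + 1) // 2
--     return main + tails + rounds % cap + m % cap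
-- ===== Notes on version B (the rewrite author's own statement) =====
-- stated objective: alternative
-- what changed: B replaces A's round-by-round simulation of the ring-buffer loop by closed-form sums: the per-round term is periodic with period lcm(cap,257), so B sums one period once and multiplies by the period count, and the tail-pointer contributions are triangular numbers per cycle; cost is O(min(rounds, 257*cap)) instead of O(rounds). …
-- outside the precondition, e.g. on ring_buffer_cost(-3, 5): A returns 708, B returns -8; on ring_buffer_cost(0, 5): A raises ZeroDivisionError, B raises ZeroDivisionError
import Mathlib
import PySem

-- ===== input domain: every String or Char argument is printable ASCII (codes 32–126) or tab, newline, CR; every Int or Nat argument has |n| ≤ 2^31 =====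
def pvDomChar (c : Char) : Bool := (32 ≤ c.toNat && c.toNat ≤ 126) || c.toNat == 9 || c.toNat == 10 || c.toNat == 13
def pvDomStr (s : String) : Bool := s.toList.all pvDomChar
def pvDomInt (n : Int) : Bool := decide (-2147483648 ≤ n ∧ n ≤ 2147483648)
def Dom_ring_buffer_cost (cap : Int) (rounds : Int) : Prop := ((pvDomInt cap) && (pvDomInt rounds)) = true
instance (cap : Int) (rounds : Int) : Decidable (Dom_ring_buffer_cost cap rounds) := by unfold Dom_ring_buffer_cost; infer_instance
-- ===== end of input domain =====

-- B replaces A's round-by-round loop by periodic closed-form sums (period lcm(cap,257)); proved equal on the natural domain cap > 0 (or rounds ≤ 0).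


-- ===== PORT A =====
-- loop body of A, one iteration: state (head, tail, acc), loop variable item
def rbStep (cap : Int) (st : Int × Int × Int) (item : Int) : Int × Int × Int :=
  let head := st.1
  let tail := st.2.1
  let acc := st.2.2
  let slot := PySem.Int.mod (head + item) cap
  let acc := acc + PySem.Int.mod (slot * 17 + item) 257
  let tail := if PySem.Int.mod item 3 = 0 then PySem.Int.mod (tail + 1) cap else tail
  let acc := if PySem.Int.mod item 3 = 0 then acc + tail else acc
  let head := PySem.Int.mod (head + 1) cap
  (head, tail, acc)

def ring_buffer_cost (cap : Int) (rounds : Int) : Int :=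
  let s := (PySem.List.pyRange 0 rounds 1).foldl (rbStep cap) (0, 0, 0)
  s.2.2 + s.1 + s.2.1

-- ===== PORT B =====
-- Python's sum() over a list, ported as a left fold
def pySum (xs : List Int) : Int := xs.foldl (· + ·) 0

def ring_buffer_cost_alt (cap : Int) (rounds : Int) : Int :=
  if rounds ≤ 0 then 0
  else
    let L := if PySem.Int.mod cap 257 = 0 then cap else cap * 257
    let q := PySem.Int.floordiv rounds L
    let r := PySem.Int.mod rounds L
    let period := (PySem.List.pyRange 0 (min L rounds) 1).map
      (fun i => PySem.Int.mod (PySem.Int.mod (2 * i) cap * 17 + i) 257)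
    let main := q * pySum period + pySum (PySem.List.slice period none (some r))
    let m := PySem.Int.floordiv (rounds + 2) 3
    let q2 := PySem.Int.floordiv m cap
    let r2 := PySem.Int.mod m cap
    let tails := q2 * PySem.Int.floordiv (cap * (cap - 1)) 2 + PySem.Int.floordiv (r2 * (r2 + 1)) 2
    main + tails + PySem.Int.mod rounds cap + PySem.Int.mod m cap

-- ===== PRECONDITION & SPEC =====
-- Pre_ restricts to positive capacity, the natural domain of a ring buffer: cap = 0 with
-- rounds > 0 makes A raise ZeroDivisionError, and a negative capacity is outside the
-- natural domain (A returns accidental values of Python's negative modulo there).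
def Pre_ring_buffer_cost (cap : Int) (rounds : Int) : Prop := 0 < cap ∨ rounds ≤ 0
instance (cap : Int) (rounds : Int) : Decidable (Pre_ring_buffer_cost cap rounds) := by
  unfold Pre_ring_buffer_cost; infer_instance
def pvWitness_ring_buffer_cost : Int × Int := (3, 10)

def Spec_ring_buffer_cost (cap : Int) (rounds : Int) (out : Int) : Prop := out = ring_buffer_cost_alt cap rounds
instance (cap : Int) (rounds : Int) (out : Int) : Decidable (Spec_ring_buffer_cost cap rounds out) := by
  unfold Spec_ring_buffer_cost; infer_instance

-- ===== CLAIM (what is proved, stated in full; the proofs are below) =====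
def Claim_equal_ring_buffer_cost : Prop := ∀ (cap : Int) (rounds : Int), Dom_ring_buffer_cost cap rounds → Pre_ring_buffer_cost cap rounds → Spec_ring_buffer_cost cap rounds (ring_buffer_cost cap rounds)

-- ===== LEMMAS AND PROOFS =====

lemma pySum_eq_sum (xs : List Int) : pySum xs = xs.sum := by
  unfold pySum; exact Eq.symm List.sum_eq_foldl

-- number of tail increments after n items
def rbM (n : Nat) : Nat := (n + 2) / 3
-- per-item cost term and tail term, and their partial sums
def rbF (cap : Int) (i : Int) : Int := PySem.Int.mod (PySem.Int.mod (2 * i) cap * 17 + i) 257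
def rbSumF (cap : Int) (t : Nat) : Int := (List.map (fun i : Nat => rbF cap (i : Int)) (List.range t)).sum
def rbSumG (cap : Int) (t : Nat) : Int := (List.map (fun k : Nat => PySem.Int.mod ((k : Int) + 1) cap) (List.range t)).sum

lemma pymod_congr (a b c : Int) (h : c ∣ (a - b)) : PySem.Int.mod a c = PySem.Int.mod b c := by
  obtain ⟨k, hk⟩ := h
  have ha : a = b + c * k := by linarith
  simp [PySem.Int.mod, ha, Int.add_mul_fmod_self_left]

lemma pymod_absorb (a b c : Int) : PySem.Int.mod (PySem.Int.mod a c + b) c = PySem.Int.mod (a + b) c := by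
  apply pymod_congr
  have h := PySem.Int.floordiv_mul_add_mod a c
  exact ⟨-(PySem.Int.floordiv a c), by linarith⟩

lemma pymod_zero (c : Int) : PySem.Int.mod 0 c = 0 := by
  simp [PySem.Int.mod, Int.fmod_def]

lemma pymod_self_dvd (a c : Int) (h : c ∣ a) : PySem.Int.mod a c = 0 := by
  have := pymod_congr a 0 c (by simpa using h)
  simpa [pymod_zero] using this

lemma pymod_small_pos (a b : Int) (h0 : 0 ≤ a) (h : a < b) : PySem.Int.mod a b = a := by
  rw [PySem.Int.mod_eq_emod_of_pos (lt_of_le_of_lt h0 h)]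
  exact Int.emod_eq_of_lt h0 h

lemma half_of_double (X E : Int) (h : 2 * X = E) : PySem.Int.floordiv E 2 = X := by
  rw [← h, PySem.Int.floordiv_eq_ediv_of_pos (by norm_num)]
  exact Int.mul_ediv_cancel_left X (by norm_num)

lemma sumG_closed_pos (cap : Int) (t : Nat) (ht : (t : Int) < cap) :
    2 * rbSumG cap t = (t : Int) * ((t : Int) + 1) := by
  induction t with
  | zero => simp [rbSumG]
  | succ t ih =>
    have ht' : (t : Int) < cap := by push_cast at ht ⊢; omega
    have hstep : rbSumG cap (t + 1) = rbSumG cap t + PySem.Int.mod ((t : Int) + 1) cap := by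
      simp [rbSumG, List.range_succ]
    rw [hstep, pymod_small_pos _ _ (by omega) (by push_cast at ht ⊢; omega)]
    push_cast
    push_cast at ih
    linarith [ih ht']

-- A's loop invariant: after n iterations the state is determined in closed form.
lemma rb_loop_inv (cap : Int) (n : Nat) :
    (List.map (fun k : Nat => (k : Int)) (List.range n)).foldl (rbStep cap) (0, 0, 0)
      = (PySem.Int.mod (n : Int) cap, PySem.Int.mod (rbM n : Int) cap,
         rbSumF cap n + rbSumG cap (rbM n)) := by
  induction n with
  | zero => simp [rbSumF, rbSumG, rbM, pymod_zero]
  | succ n ih =>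
    rw [List.range_succ, List.map_append, List.foldl_append, ih]
    simp only [List.map_cons, List.map_nil, List.foldl_cons, List.foldl_nil]
    have hm3 : PySem.Int.mod (↑n) 3 = ((n % 3 : Nat) : Int) := by
      exact_mod_cast PySem.Int.mod_natCast n 3
    have hF : rbSumF cap (n + 1) = rbSumF cap n + rbF cap ↑n := by
      simp [rbSumF, List.range_succ]
    have hhead : PySem.Int.mod (PySem.Int.mod (↑n) cap + 1) cap = PySem.Int.mod (↑(n + 1) : Int) cap := by
      rw [pymod_absorb]; push_cast; ring_nf
    have hslot : PySem.Int.mod (PySem.Int.mod (↑n) cap + ↑n) cap = PySem.Int.mod (2 * ↑n) cap := by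
      rw [pymod_absorb]; ring_nf
    by_cases h3 : n % 3 = 0
    · have hM : rbM (n + 1) = rbM n + 1 := by unfold rbM; omega
      have hG : rbSumG cap (rbM n + 1) = rbSumG cap (rbM n) + PySem.Int.mod ((rbM n : Int) + 1) cap := by
        simp [rbSumG, List.range_succ]
      simp only [rbStep, hm3, h3, Nat.cast_zero, hM, hG, hF, hhead, hslot]
      rw [pymod_absorb]
      push_cast
      simp only [Prod.mk.injEq]
      refine ⟨trivial, trivial, ?_⟩
      unfold rbF
      ring
    · have hM : rbM (n + 1) = rbM n := by unfold rbM; omega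
      have h3' : ¬ ((n % 3 : Nat) : Int) = 0 := by exact_mod_cast h3
      simp only [rbStep, hm3, if_neg h3', hM, hF, hhead, hslot]
      simp only [Prod.mk.injEq]
      refine ⟨trivial, trivial, ?_⟩
      unfold rbF
      ring

-- periodic splitting of a sum over range
lemma sum_range_periodic (f : Nat → Int) (L : Nat) (hf : ∀ j, f (j + L) = f j) (q r : Nat) :
    ((List.range (q * L + r)).map f).sum
      = (q : Int) * ((List.range L).map f).sum + ((List.range r).map f).sum := by
  induction q with
  | zero => simp
  | succ q ih =>
    have he : (q + 1) * L + r = L + (q * L + r) := by ring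
    rw [he, List.range_add, List.map_append, List.sum_append, List.map_map]
    have hm : (List.range (q * L + r)).map (f ∘ (fun x => L + x)) = (List.range (q * L + r)).map f := by
      apply List.map_congr_left
      intro x _
      simp only [Function.comp_apply, Nat.add_comm L x, hf x]
    rw [hm, ih]
    push_cast
    ring

-- B equals the closed form, for cap > 0 and positive rounds given as a Nat cast
lemma rb_alt_closed (cap : Int) (hc : 0 < cap) (n : Nat) (hn : 0 < n) :
    ring_buffer_cost_alt cap (n : Int)
      = rbSumF cap n + rbSumG cap (rbM n)
        + PySem.Int.mod (n : Int) cap + PySem.Int.mod (rbM n : Int) cap := by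
  have hn' : ¬ ((n : Int) ≤ 0) := by omega
  set cN : Nat := cap.toNat with hcNdef
  have hcN : 0 < cN := by omega
  have hcast : (cN : Int) = cap := by omega
  set LN : Nat := if cN % 257 = 0 then cN else cN * 257 with hLNdef
  have hLN : 0 < LN := by rw [hLNdef]; split <;> omega
  have hcap_dvd_cN : cap ∣ (cN : Int) := by rw [hcast]
  have hcN_dvd_LN : cN ∣ LN := by rw [hLNdef]; split <;> [exact dvd_rfl; exact Dvd.intro 257 (by ring)]
  have hcap_dvd_LN : cap ∣ (LN : Int) := hcap_dvd_cN.trans (Int.natCast_dvd_natCast.mpr hcN_dvd_LN)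
  have h257_dvd_LN : (257 : Int) ∣ (LN : Int) := by
    rw [hLNdef]
    split
    · next h => exact_mod_cast Int.natCast_dvd_natCast.mpr (Nat.dvd_of_mod_eq_zero h)
    · push_cast; exact ⟨(cN : Int), by ring⟩
  have hL : (if PySem.Int.mod cap 257 = 0 then cap else cap * 257) = (LN : Int) := by
    rw [← hcast]
    have hm : PySem.Int.mod (cN : Int) 257 = ((cN % 257 : Nat) : Int) := by
      exact_mod_cast PySem.Int.mod_natCast cN 257
    by_cases h : cN % 257 = 0
    · rw [if_pos (by rw [hm]; exact_mod_cast h), hLNdef, if_pos h]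
    · rw [if_neg (by rw [hm]; exact_mod_cast h), hLNdef, if_neg h]
      push_cast; ring
  -- periodicity
  have hFper : ∀ j : Nat, rbF cap ((j : Int) + LN) = rbF cap j := by
    intro j
    unfold rbF
    have h1 : PySem.Int.mod (2 * ((j : Int) + LN)) cap = PySem.Int.mod (2 * (j : Int)) cap := by
      apply pymod_congr
      obtain ⟨k, hk⟩ := hcap_dvd_LN
      exact ⟨2 * k, by rw [mul_add, hk]; ring⟩
    rw [h1]
    apply pymod_congr
    obtain ⟨k, hk⟩ := h257_dvd_LN
    exact ⟨k, by rw [← hk]; ring⟩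
  have hGper : ∀ j : Nat, PySem.Int.mod (((j + cN : Nat) : Int) + 1) cap = PySem.Int.mod ((j : Int) + 1) cap := by
    intro j
    apply pymod_congr
    obtain ⟨k, hk⟩ := hcap_dvd_cN
    exact ⟨k, by push_cast; rw [hk]; ring⟩
  -- sum splittings
  have hFsplit : rbSumF cap n = ((n / LN : Nat) : Int) * rbSumF cap LN + rbSumF cap (n % LN) := by
    have h := sum_range_periodic (fun k : Nat => rbF cap (k : Int)) LN
      (fun j => by push_cast; exact hFper j) (n / LN) (n % LN)
    have hn2 : n / LN * LN + n % LN = n := Nat.div_add_mod' n LN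
    rw [hn2] at h
    simpa [rbSumF] using h
  have hGsplit : ∀ m : Nat, rbSumG cap m = ((m / cN : Nat) : Int) * rbSumG cap cN + rbSumG cap (m % cN) := by
    intro m
    have h := sum_range_periodic (fun k : Nat => PySem.Int.mod ((k : Int) + 1) cap) cN
      (fun j => by push_cast; push_cast at hGper; exact hGper j) (m / cN) (m % cN)
    have hm2 : m / cN * cN + m % cN = m := Nat.div_add_mod' m cN
    rw [hm2] at h
    simpa [rbSumG] using h
  -- identify B's pieces
  have hq : PySem.Int.floordiv (n : Int) (LN : Int) = ((n / LN : Nat) : Int) := PySem.Int.floordiv_natCast n LN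
  have hr : PySem.Int.mod (n : Int) (LN : Int) = ((n % LN : Nat) : Int) := PySem.Int.mod_natCast n LN
  have hm : PySem.Int.floordiv ((n : Int) + 2) 3 = ((rbM n : Nat) : Int) := by
    have h := PySem.Int.floordiv_natCast (n + 2) 3
    push_cast at h
    exact h
  have hq2 : PySem.Int.floordiv ((rbM n : Nat) : Int) cap = ((rbM n / cN : Nat) : Int) := by
    rw [← hcast]; exact PySem.Int.floordiv_natCast (rbM n) cN
  have hr2 : PySem.Int.mod ((rbM n : Nat) : Int) cap = ((rbM n % cN : Nat) : Int) := by
    rw [← hcast]; exact PySem.Int.mod_natCast (rbM n) cN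
  have hperiod : (PySem.List.pyRange 0 (min (LN : Int) (n : Int)) 1).map
      (fun i => PySem.Int.mod (PySem.Int.mod (2 * i) cap * 17 + i) 257)
      = List.map (fun i : Nat => rbF cap (i : Int)) (List.range (min LN n)) := by
    rw [← Nat.cast_min, PySem.List.pyRange_zero_natCast, List.map_map]
    rfl
  have hslice : (PySem.List.slice (List.map (fun i : Nat => rbF cap (i : Int)) (List.range (min LN n)))
      none (some ((n % LN : Nat) : Int))).sum = rbSumF cap (n % LN) := by
    rw [PySem.List.slice_to_natCast, ← List.map_take, List.take_range]
    have hb : n % LN < LN := Nat.mod_lt n hLN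
    have hble : n % LN ≤ n := Nat.mod_le n LN
    rw [Nat.min_eq_left (Nat.le_min.mpr ⟨le_of_lt hb, hble⟩), rbSumF]
  have hcN1 : rbSumG cap cN = rbSumG cap (cN - 1) := by
    conv_lhs => rw [show cN = (cN - 1) + 1 by omega]
    rw [rbSumG, List.range_succ, List.map_append, List.sum_append]
    have hlastz : PySem.Int.mod (((cN - 1 : Nat) : Int) + 1) cap = 0 := by
      have hc2 : ((cN - 1 : Nat) : Int) + 1 = (cN : Int) := by push_cast [hcN]; ring
      rw [hc2]
      exact pymod_self_dvd _ _ hcap_dvd_cN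
    simp [hlastz, rbSumG]
  have hcycle2 : PySem.Int.floordiv (cap * (cap - 1)) 2 = rbSumG cap cN := by
    rw [hcN1]
    apply half_of_double
    have h := sumG_closed_pos cap (cN - 1) (by push_cast [hcN]; omega)
    push_cast [hcN] at h
    rw [h, ← hcast]
    ring
  have hpart2 : PySem.Int.floordiv (((rbM n % cN : Nat) : Int) * (((rbM n % cN : Nat) : Int) + 1)) 2
      = rbSumG cap (rbM n % cN) := by
    have hlt : rbM n % cN < cN := Nat.mod_lt _ hcN
    apply half_of_double
    have h := sumG_closed_pos cap (rbM n % cN) (by omega)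
    linarith
  rw [ring_buffer_cost_alt]
  rw [if_neg hn']
  simp only [pySum_eq_sum, hL, hq, hr, hm, hq2, hr2, hperiod, hslice, hcycle2, hpart2]
  rw [hGsplit (rbM n)]
  by_cases hnL : LN ≤ n
  · rw [min_eq_left hnL, hFsplit]
    show ((n / LN : Nat) : Int) * rbSumF cap LN + rbSumF cap (n % LN) + _ + _ + _ = _
    ring
  · have hlt : n < LN := by omega
    rw [min_eq_right (le_of_lt hlt)]
    have h0 : n / LN = 0 := Nat.div_eq_of_lt hlt
    have hmod : n % LN = n := Nat.mod_eq_of_lt hlt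
    rw [h0, hmod]
    push_cast
    ring

-- ===== VERDICT (by name: the statement is the Claim_ definition above) =====
theorem ring_buffer_cost_spec : Claim_equal_ring_buffer_cost := by
  intro cap rounds _ hpre
  unfold Spec_ring_buffer_cost
  by_cases hr : rounds ≤ 0
  · rw [ring_buffer_cost, ring_buffer_cost_alt]
    rw [PySem.List.pyRange_one_eq_nil hr]
    simp [hr]
  · rw [not_le] at hr
    have hc : 0 < cap := by
      rcases hpre with h | h
      · exact h
      · omega
    obtain ⟨n, hn⟩ : ∃ n : Nat, rounds = (n : Int) := ⟨rounds.toNat, by omega⟩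
    have hnpos : 0 < n := by omega
    subst hn
    rw [ring_buffer_cost, PySem.List.pyRange_zero_natCast, rb_alt_closed cap hc n hnpos]
    rw [rb_loop_inv cap n]
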